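-- pv_equiv track=rewrite | github.com/mensuraeng/OpenClaw-memory | scripts/sienge_teatro_budget_workitem_upload.py | choose_workitem
-- ===== SOURCE A (Python) =====
-- def choose_workitem(item: dict, candidates: list[dict]):
--     if not candidates:
--         return None
--     ref = item['ref'].upper()
--     if ref.startswith('SINAPI'):
--         pref = [3, 2, 1]
--     elif ref in {'CDHU', 'EDIF', 'FDE'}:
--         pref = [2, 1, 3]
--     else:
--         pref = [2, 3, 1]
--     for db in pref:
--         rows = [c for c in candidates if c.get('_db') == db]
--         if rows:
--             return rows[0]
--     return candidates[0]
-- ===== SOURCE B (Python) =====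
-- def choose_workitem(item: dict, candidates: list[dict]):
--     if not candidates:
--         return None
--     ref = item['ref'].upper()
--     if ref.startswith('SINAPI'):
--         pref = [3, 2, 1]
--     elif ref in {'CDHU', 'EDIF', 'FDE'}:
--         pref = [2, 1, 3]
--     else:
--         pref = [2, 3, 1]
--     rank = {db: i for i, db in enumerate(pref)}
--     return min(candidates, key=lambda c: rank.get(c.get('_db'), len(pref)))
-- ===== Notes on version B (the rewrite author's own statement) =====
-- stated objective: alternative
-- what changed: Replaces A's staged filtered scans (one filter pass per preferred db, then a fallback) with a single first-argmin pass: min(candidates, key=rank) where rank maps each db to its position in the preference list and unranked dbs rank last, so Python's first-minimum tie-breaking yields A's first-match and candidates[0] fallback in one pass.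
import Mathlib
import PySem

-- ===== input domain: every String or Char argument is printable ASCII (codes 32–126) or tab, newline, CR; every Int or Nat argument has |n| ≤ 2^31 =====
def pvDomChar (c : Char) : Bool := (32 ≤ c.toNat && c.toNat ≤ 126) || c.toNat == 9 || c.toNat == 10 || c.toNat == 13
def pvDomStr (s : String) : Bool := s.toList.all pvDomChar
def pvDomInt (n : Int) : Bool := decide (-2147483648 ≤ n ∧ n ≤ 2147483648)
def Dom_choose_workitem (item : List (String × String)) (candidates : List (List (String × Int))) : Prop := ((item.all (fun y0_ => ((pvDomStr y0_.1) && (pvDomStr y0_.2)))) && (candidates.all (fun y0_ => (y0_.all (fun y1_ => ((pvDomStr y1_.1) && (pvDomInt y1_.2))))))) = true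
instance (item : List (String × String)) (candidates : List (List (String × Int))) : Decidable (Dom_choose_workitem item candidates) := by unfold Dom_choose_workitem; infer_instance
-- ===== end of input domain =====

-- B replaces A's staged filtered scans with one first-argmin pass (min with a rank key); alternative algorithm, same result.

-- ===== PORT A =====
-- A's preference list from the (uppercased) ref
def prefOf (ref : String) : List Int :=
  if PySem.Str.startswith ref "SINAPI" then [3, 2, 1]
  else if ref == "CDHU" || ref == "EDIF" || ref == "FDE" then [2, 1, 3]
  else [2, 3, 1]

-- A's 'for db in pref: rows = [c for c in candidates if c.get('_db') == db]; if rows: return rows[0]'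
def chooseScan (candidates : List (List (String × Int))) : List Int → Option (List (String × Int))
  | [] => none
  | db :: rest =>
      match candidates.filter (fun c => (PySem.Dict.mk c).get? "_db" == some db) with
      | [] => chooseScan candidates rest
      | r :: _ => some r

def choose_workitem (item : List (String × String)) (candidates : List (List (String × Int))) : Option (List (String × Int)) :=
  if candidates.isEmpty then none
  else
    match (PySem.Dict.mk item).get? "ref" with
    | none => none  -- Python raises KeyError here; excluded by Pre_choose_workitem
    | some r =>
        let ref := PySem.Str.upper r
        match chooseScan candidates (prefOf ref) with
        | some c => some c
        | none => PySem.List.pyGet? candidates 0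

-- ===== PORT B =====
-- B's preference list from the (uppercased) ref
def prefOfAlt (ref : String) : List Int :=
  if PySem.Str.startswith ref "SINAPI" then [3, 2, 1]
  else if ["CDHU", "EDIF", "FDE"].contains ref then [2, 1, 3]
  else [2, 3, 1]

-- rank = {db: i for i, db in enumerate(pref)}
def buildRank (pref : List Int) : PySem.Dict Int Int :=
  (PySem.List.enumerate pref).foldl (fun d p => d.insert p.2 p.1) PySem.Dict.empty

-- lambda c: rank.get(c.get('_db'), len(pref)); c.get('_db') is None only when '_db' is absent, and None is never a key of rank
def rankKey (pref : List Int) (rank : PySem.Dict Int Int) (c : List (String × Int)) : Int :=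
  match (PySem.Dict.mk c).get? "_db" with
  | some db => rank.getD db (pref.length : Int)
  | none => (pref.length : Int)

def choose_workitem_alt (item : List (String × String)) (candidates : List (List (String × Int))) : Option (List (String × Int)) :=
  match candidates with
  | [] => none
  | _ :: _ =>
      match (PySem.Dict.mk item).get? "ref" with
      | none => none  -- Python raises KeyError here; excluded by Pre_choose_workitem
      | some r =>
          let ref := PySem.Str.upper r
          let pref := prefOfAlt ref
          let rank := buildRank pref
          PySem.List.min? candidates (fun c => rankKey pref rank c)

-- ===== PRECONDITION & SPEC =====
-- Pre_ excludes exactly the inputs where A raises KeyError: candidates nonempty and item has no 'ref' key (B raises there too).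
def Pre_choose_workitem (item : List (String × String)) (candidates : List (List (String × Int))) : Prop :=
  candidates = [] ∨ ((PySem.Dict.mk item).get? "ref").isSome = true
instance (item : List (String × String)) (candidates : List (List (String × Int))) : Decidable (Pre_choose_workitem item candidates) := by unfold Pre_choose_workitem; infer_instance

def pvWitness_choose_workitem : (List (String × String)) × (List (List (String × Int))) :=
  ([("ref", "SINAPI-1")], [[("_db", 2)], [("_db", 3)]])

def Spec_choose_workitem (item : List (String × String)) (candidates : List (List (String × Int))) (out : Option (List (String × Int))) : Prop := out = choose_workitem_alt item candidates
instance (item : List (String × String)) (candidates : List (List (String × Int))) (out : Option (List (String × Int))) : Decidable (Spec_choose_workitem item candidates out) := by unfold Spec_choose_workitem; infer_instance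

-- ===== CLAIM (what is proved, stated in full; the proofs are below) =====
def Claim_equal_choose_workitem : Prop := ∀ (item : List (String × String)) (candidates : List (List (String × Int))), Dom_choose_workitem item candidates → Pre_choose_workitem item candidates → Spec_choose_workitem item candidates (choose_workitem item candidates)

-- ===== LEMMAS AND PROOFS =====

-- the canonical rank function for a distinct preference triple [p0,p1,p2]
def kf (p0 p1 p2 : Int) (c : List (String × Int)) : Int :=
  match (PySem.Dict.mk c).get? "_db" with
  | some db => if db = p0 then 0 else if db = p1 then 1 else if db = p2 then 2 else 3
  | none => 3

-- A's staged scans, re-expressed over the rank function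
def staged (key : List (String × Int) → Int) (l : List (List (String × Int))) : Option (List (String × Int)) :=
  match l.find? (fun c => key c == (0 : Int)) with
  | some r => some r
  | none =>
    match l.find? (fun c => key c == (1 : Int)) with
    | some r => some r
    | none =>
      match l.find? (fun c => key c == (2 : Int)) with
      | some r => some r
      | none => l.head?

-- first argmin, by structural recursion from the right (earlier element wins ties)
def fam (key : List (String × Int) → Int) : List (List (String × Int)) → Option (List (String × Int))
  | [] => none
  | x :: xs =>
      match fam key xs with
      | none => some x
      | some m => if key m < key x then some m else some x

theorem fam_cons (key : List (String × Int) → Int) (x : List (String × Int))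
    (xs : List (List (String × Int))) :
    fam key (x :: xs) =
      match fam key xs with
      | none => some x
      | some m => if key m < key x then some m else some x := rfl

theorem fam_eq_none (key : List (String × Int) → Int) (l : List (List (String × Int))) :
    fam key l = none ↔ l = [] := by
  cases l with
  | nil => simp [fam]
  | cons x xs =>
    simp only [fam]
    cases fam key xs
    · simp
    · simp; split <;> simp

theorem fam_isMin (key : List (String × Int) → Int) (l : List (List (String × Int)))
    (m : List (String × Int)) (h : fam key l = some m) :
    ∀ y ∈ l, key m ≤ key y := by
  induction l generalizing m with
  | nil => simp [fam] at h
  | cons x xs ih =>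
    rw [fam_cons] at h
    cases hf : fam key xs with
    | none =>
      rw [hf] at h
      cases h
      have : xs = [] := (fam_eq_none key xs).mp hf
      subst this; simp
    | some m' =>
      rw [hf] at h
      have h : (if key m' < key x then some m' else some x) = some m := h
      by_cases hlt : key m' < key x
      · rw [if_pos hlt] at h
        obtain rfl : m' = m := Option.some.inj h
        intro y hy
        rcases List.mem_cons.mp hy with rfl | hy
        · exact le_of_lt hlt
        · exact ih _ hf y hy
      · rw [if_neg hlt] at h
        obtain rfl : x = m := Option.some.inj h
        intro y hy
        rcases List.mem_cons.mp hy with rfl | hy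
        · exact le_refl _
        · exact le_trans (le_of_not_gt hlt) (ih _ hf y hy)

theorem fam_cons_cons (key : List (String × Int) → Int) (m x : List (String × Int))
    (l : List (List (String × Int))) :
    fam key (m :: x :: l) = if key x < key m then fam key (x :: l) else fam key (m :: l) := by
  cases hf : fam key l with
  | none =>
    have : l = [] := (fam_eq_none key l).mp hf
    subst this
    by_cases h : key x < key m <;> simp [fam, h]
  | some s =>
    by_cases hxm : key x < key m
    · rw [if_pos hxm]
      rw [fam_cons key m (x :: l)]
      cases hr : fam key (x :: l) with
      | none => exact absurd ((fam_eq_none key _).mp hr) (by simp)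
      | some r =>
        have hrx : key r ≤ key x := fam_isMin key _ r hr x (by simp)
        simp [lt_of_le_of_lt hrx hxm]
    · rw [if_neg hxm]
      rw [fam_cons key m (x :: l)]
      have hgoalR : fam key (m :: l) = if key s < key m then some s else some m := by
        rw [fam_cons, hf]
      rw [hgoalR]
      have hxl : fam key (x :: l) = if key s < key x then some s else some x := by
        rw [fam_cons, hf]
      rw [hxl]
      by_cases hsx : key s < key x
      · simp [hsx]
      · have h1 : ¬ key x < key m := hxm
        have h2 : ¬ key s < key m := by
          have := le_of_not_gt hxm
          have := le_of_not_gt hsx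
          omega
        simp [hsx, h1, h2]

theorem min?_cons_cons (key : List (String × Int) → Int) (m x : List (String × Int))
    (l : List (List (String × Int))) :
    PySem.List.min? (m :: x :: l) key =
      if key x < key m then PySem.List.min? (x :: l) key else PySem.List.min? (m :: l) key := by
  by_cases h : key x < key m <;>
    simp [PySem.List.min?, h]

theorem min?_eq_fam_aux (key : List (String × Int) → Int) (l : List (List (String × Int))) :
    ∀ m, PySem.List.min? (m :: l) key = fam key (m :: l) := by
  induction l with
  | nil => intro m; simp [PySem.List.min?, fam]
  | cons x xs ih =>
    intro m
    rw [min?_cons_cons, fam_cons_cons, ih x, ih m]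

theorem min?_eq_fam (key : List (String × Int) → Int) (l : List (List (String × Int))) :
    PySem.List.min? l key = fam key l := by
  cases l with
  | nil => rfl
  | cons x xs => exact min?_eq_fam_aux key xs x

theorem key_of_find?_some (key : List (String × Int) → Int) (i : Int)
    (xs : List (List (String × Int))) (r : List (String × Int))
    (h : xs.find? (fun c => key c == i) = some r) : key r = i := by
  have := List.find?_some h
  simpa using this

theorem staged_eq_fam (key : List (String × Int) → Int)
    (hr : ∀ c, key c = 0 ∨ key c = 1 ∨ key c = 2 ∨ key c = 3)
    (l : List (List (String × Int))) : staged key l = fam key l := by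
  induction l with
  | nil => simp [staged, fam]
  | cons x xs ih =>
    have hfam : fam key (x :: xs) =
        match staged key xs with
        | none => some x
        | some m => if key m < key x then some m else some x := by
      rw [fam_cons, ih]
    rw [hfam]
    rcases hr x with hx | hx | hx | hx
    · -- key x = 0
      have hp0 : (key x == (0 : Int)) = true := by simp [hx]
      have hL : staged key (x :: xs) = some x := by
        simp only [staged, List.find?_cons, hp0]
      rw [hL]
      cases hs : staged key xs with
      | none => rfl
      | some m =>
        have hm : ¬ key m < key x := by rcases hr m with h | h | h | h <;> omega
        simp [hm]
    · -- key x = 1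
      have hp0 : (key x == (0 : Int)) = false := by simp [hx]
      have hp1 : (key x == (1 : Int)) = true := by simp [hx]
      cases h0 : xs.find? (fun c => key c == (0 : Int)) with
      | some r =>
        have hk : key r = 0 := key_of_find?_some key 0 xs r h0
        have hL : staged key (x :: xs) = some r := by
          simp only [staged, List.find?_cons, hp0, h0]
        have hR : staged key xs = some r := by simp only [staged, h0]
        rw [hL, hR]
        have hlt : key r < key x := by omega
        simp [hlt]
      | none =>
        have hL : staged key (x :: xs) = some x := by
          simp only [staged, List.find?_cons, hp0, hp1, h0]
        rw [hL]
        cases h1 : xs.find? (fun c => key c == (1 : Int)) with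
        | some r =>
          have hk : key r = 1 := key_of_find?_some key 1 xs r h1
          have hR : staged key xs = some r := by simp only [staged, h0, h1]
          rw [hR]
          have hlt : ¬ key r < key x := by omega
          simp [hlt]
        | none =>
          cases h2 : xs.find? (fun c => key c == (2 : Int)) with
          | some r =>
            have hk : key r = 2 := key_of_find?_some key 2 xs r h2
            have hR : staged key xs = some r := by simp only [staged, h0, h1, h2]
            rw [hR]
            have hlt : ¬ key r < key x := by omega
            simp [hlt]
          | none =>
            have hR : staged key xs = xs.head? := by simp only [staged, h0, h1, h2]
            rw [hR]
            cases xs with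
            | nil => rfl
            | cons y ys =>
              have hy : key y = 3 := by
                have n0 := List.find?_eq_none.mp h0 y (by simp)
                have n1 := List.find?_eq_none.mp h1 y (by simp)
                have n2 := List.find?_eq_none.mp h2 y (by simp)
                simp only [beq_iff_eq] at n0 n1 n2
                rcases hr y with h | h | h | h <;> omega
              have hlt : ¬ key y < key x := by omega
              simp [hlt]
    · -- key x = 2
      have hp0 : (key x == (0 : Int)) = false := by simp [hx]
      have hp1 : (key x == (1 : Int)) = false := by simp [hx]
      have hp2 : (key x == (2 : Int)) = true := by simp [hx]
      cases h0 : xs.find? (fun c => key c == (0 : Int)) with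
      | some r =>
        have hk : key r = 0 := key_of_find?_some key 0 xs r h0
        have hL : staged key (x :: xs) = some r := by
          simp only [staged, List.find?_cons, hp0, h0]
        have hR : staged key xs = some r := by simp only [staged, h0]
        rw [hL, hR]
        have hlt : key r < key x := by omega
        simp [hlt]
      | none =>
        cases h1 : xs.find? (fun c => key c == (1 : Int)) with
        | some r =>
          have hk : key r = 1 := key_of_find?_some key 1 xs r h1
          have hL : staged key (x :: xs) = some r := by
            simp only [staged, List.find?_cons, hp0, hp1, h0, h1]
          have hR : staged key xs = some r := by simp only [staged, h0, h1]
          rw [hL, hR]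
          have hlt : key r < key x := by omega
          simp [hlt]
        | none =>
          have hL : staged key (x :: xs) = some x := by
            simp only [staged, List.find?_cons, hp0, hp1, hp2, h0, h1]
          rw [hL]
          cases h2 : xs.find? (fun c => key c == (2 : Int)) with
          | some r =>
            have hk : key r = 2 := key_of_find?_some key 2 xs r h2
            have hR : staged key xs = some r := by simp only [staged, h0, h1, h2]
            rw [hR]
            have hlt : ¬ key r < key x := by omega
            simp [hlt]
          | none =>
            have hR : staged key xs = xs.head? := by simp only [staged, h0, h1, h2]
            rw [hR]
            cases xs with
            | nil => rfl
            | cons y ys =>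
              have hy : key y = 3 := by
                have n0 := List.find?_eq_none.mp h0 y (by simp)
                have n1 := List.find?_eq_none.mp h1 y (by simp)
                have n2 := List.find?_eq_none.mp h2 y (by simp)
                simp only [beq_iff_eq] at n0 n1 n2
                rcases hr y with h | h | h | h <;> omega
              have hlt : ¬ key y < key x := by omega
              simp [hlt]
    · -- key x = 3
      have hp0 : (key x == (0 : Int)) = false := by simp [hx]
      have hp1 : (key x == (1 : Int)) = false := by simp [hx]
      have hp2 : (key x == (2 : Int)) = false := by simp [hx]
      cases h0 : xs.find? (fun c => key c == (0 : Int)) with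
      | some r =>
        have hk : key r = 0 := key_of_find?_some key 0 xs r h0
        have hL : staged key (x :: xs) = some r := by
          simp only [staged, List.find?_cons, hp0, h0]
        have hR : staged key xs = some r := by simp only [staged, h0]
        rw [hL, hR]
        have hlt : key r < key x := by omega
        simp [hlt]
      | none =>
        cases h1 : xs.find? (fun c => key c == (1 : Int)) with
        | some r =>
          have hk : key r = 1 := key_of_find?_some key 1 xs r h1
          have hL : staged key (x :: xs) = some r := by
            simp only [staged, List.find?_cons, hp0, hp1, h0, h1]
          have hR : staged key xs = some r := by simp only [staged, h0, h1]
          rw [hL, hR]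
          have hlt : key r < key x := by omega
          simp [hlt]
        | none =>
          cases h2 : xs.find? (fun c => key c == (2 : Int)) with
          | some r =>
            have hk : key r = 2 := key_of_find?_some key 2 xs r h2
            have hL : staged key (x :: xs) = some r := by
              simp only [staged, List.find?_cons, hp0, hp1, hp2, h0, h1, h2]
            have hR : staged key xs = some r := by simp only [staged, h0, h1, h2]
            rw [hL, hR]
            have hlt : key r < key x := by omega
            simp [hlt]
          | none =>
            have hL : staged key (x :: xs) = some x := by
              simp only [staged, List.find?_cons, hp0, hp1, hp2, h0, h1, h2,
                List.head?_cons]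
            rw [hL]
            have hR : staged key xs = xs.head? := by simp only [staged, h0, h1, h2]
            rw [hR]
            cases xs with
            | nil => rfl
            | cons y ys =>
              have hy : key y = 3 := by
                have n0 := List.find?_eq_none.mp h0 y (by simp)
                have n1 := List.find?_eq_none.mp h1 y (by simp)
                have n2 := List.find?_eq_none.mp h2 y (by simp)
                simp only [beq_iff_eq] at n0 n1 n2
                rcases hr y with h | h | h | h <;> omega
              have hlt : ¬ key y < key x := by omega
              simp [hlt]

theorem kf_range (p0 p1 p2 : Int) (c : List (String × Int)) :
    kf p0 p1 p2 c = 0 ∨ kf p0 p1 p2 c = 1 ∨ kf p0 p1 p2 c = 2 ∨ kf p0 p1 p2 c = 3 := by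
  cases h : (PySem.Dict.mk c).get? "_db" with
  | none => simp [kf, h]
  | some db =>
    simp only [kf, h]
    split_ifs <;> simp

theorem pyGet?_zero_head? (l : List (List (String × Int))) :
    PySem.List.pyGet? l 0 = l.head? := by
  cases l <;> simp [PySem.List.pyGet?, PySem.List.pyIdx?]

theorem scan_eq_staged (p0 p1 p2 : Int) (h01 : p0 ≠ p1) (h02 : p0 ≠ p2) (h12 : p1 ≠ p2)
    (l : List (List (String × Int))) :
    (match chooseScan l [p0, p1, p2] with
     | some c => some c
     | none => PySem.List.pyGet? l 0) = staged (kf p0 p1 p2) l := by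
  have hpred0 : (fun c => (PySem.Dict.mk c).get? "_db" == some p0) =
      (fun c => kf p0 p1 p2 c == (0 : Int)) := by
    funext c
    cases h : (PySem.Dict.mk c).get? "_db" with
    | none => simp [kf, h]
    | some db =>
      by_cases h0 : db = p0
      · subst h0; simp [kf, h]
      · by_cases h1 : db = p1
        · subst h1; simp [kf, h, h0]
        · by_cases h2 : db = p2
          · subst h2; simp [kf, h, h0, h1]
          · simp [kf, h, h0, h1, h2]
  have hpred1 : (fun c => (PySem.Dict.mk c).get? "_db" == some p1) =
      (fun c => kf p0 p1 p2 c == (1 : Int)) := by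
    funext c
    cases h : (PySem.Dict.mk c).get? "_db" with
    | none => simp [kf, h]
    | some db =>
      by_cases h0 : db = p0
      · subst h0; simp [kf, h, h01]
      · by_cases h1 : db = p1
        · subst h1; simp [kf, h, h0]
        · by_cases h2 : db = p2
          · subst h2; simp [kf, h, h0, h1]
          · simp [kf, h, h0, h1, h2]
  have hpred2 : (fun c => (PySem.Dict.mk c).get? "_db" == some p2) =
      (fun c => kf p0 p1 p2 c == (2 : Int)) := by
    funext c
    cases h : (PySem.Dict.mk c).get? "_db" with
    | none => simp [kf, h]
    | some db =>
      by_cases h0 : db = p0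
      · subst h0; simp [kf, h, h02]
      · by_cases h1 : db = p1
        · subst h1; simp [kf, h, h0, h12]
        · by_cases h2 : db = p2
          · subst h2; simp [kf, h, h0, h1]
          · simp [kf, h, h0, h1, h2]
  show (match chooseScan l [p0, p1, p2] with
        | some c => some c
        | none => PySem.List.pyGet? l 0) = staged (kf p0 p1 p2) l
  unfold chooseScan staged
  rw [← List.head?_filter, ← List.head?_filter, ← List.head?_filter,
    ← hpred0, ← hpred1, ← hpred2, pyGet?_zero_head?]
  cases (l.filter (fun c => (PySem.Dict.mk c).get? "_db" == some p0)) with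
  | nil =>
    unfold chooseScan
    cases (l.filter (fun c => (PySem.Dict.mk c).get? "_db" == some p1)) with
    | nil =>
      unfold chooseScan
      cases (l.filter (fun c => (PySem.Dict.mk c).get? "_db" == some p2)) with
      | nil => simp [chooseScan]
      | cons r rs => simp
    | cons r rs => simp
  | cons r rs => simp

theorem rankKey_eq_kf (p0 p1 p2 : Int) (h01 : p0 ≠ p1) (h02 : p0 ≠ p2) (h12 : p1 ≠ p2) :
    (fun c => rankKey [p0, p1, p2] (buildRank [p0, p1, p2]) c) = kf p0 p1 p2 := by
  funext c
  have hd : buildRank [p0, p1, p2] =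
      ((PySem.Dict.empty.insert p0 0).insert p1 1).insert p2 2 := by
    rfl
  unfold rankKey kf
  cases (PySem.Dict.mk c).get? "_db" with
  | none => simp
  | some db =>
    rw [hd]
    simp only [PySem.Dict.getD]
    by_cases h0 : db = p0
    · subst h0
      rw [PySem.Dict.get?_insert_of_ne _ _ h02,
        PySem.Dict.get?_insert_of_ne _ _ h01,
        PySem.Dict.get?_insert_self]
      simp
    · by_cases h1 : db = p1
      · subst h1
        rw [PySem.Dict.get?_insert_of_ne _ _ h12, PySem.Dict.get?_insert_self]
        simp [h0]
      · by_cases h2 : db = p2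
        · subst h2
          rw [PySem.Dict.get?_insert_self]
          simp [h0, h1]
        · rw [PySem.Dict.get?_insert_of_ne _ _ h2, PySem.Dict.get?_insert_of_ne _ _ h1,
            PySem.Dict.get?_insert_of_ne _ _ h0, PySem.Dict.get?_empty]
          simp [h0, h1, h2]

theorem main_pref (p0 p1 p2 : Int) (h01 : p0 ≠ p1) (h02 : p0 ≠ p2) (h12 : p1 ≠ p2)
    (l : List (List (String × Int))) :
    (match chooseScan l [p0, p1, p2] with
     | some c => some c
     | none => PySem.List.pyGet? l 0) =
      PySem.List.min? l (fun c => rankKey [p0, p1, p2] (buildRank [p0, p1, p2]) c) := by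
  rw [rankKey_eq_kf p0 p1 p2 h01 h02 h12, min?_eq_fam,
    ← staged_eq_fam (kf p0 p1 p2) (kf_range p0 p1 p2) l,
    scan_eq_staged p0 p1 p2 h01 h02 h12 l]

-- the two preference computations agree
theorem prefOfAlt_eq (ref : String) : prefOfAlt ref = prefOf ref := by
  unfold prefOf prefOfAlt
  simp [List.contains_eq_mem, or_assoc]

-- ===== VERDICT (by name: the statement is the Claim_ definition above) =====
theorem choose_workitem_spec : Claim_equal_choose_workitem := by
  intro item cands _ hPre
  unfold Spec_choose_workitem choose_workitem choose_workitem_alt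
  cases cands with
  | nil => rfl
  | cons c0 rest =>
    have href : ((PySem.Dict.mk item).get? "ref").isSome = true := by
      rcases hPre with h | h
      · exact absurd h (by simp)
      · exact h
    obtain ⟨r, hr⟩ := Option.isSome_iff_exists.mp href
    rw [hr]
    simp only [List.isEmpty_cons, if_neg (by simp : ¬ (false = true))]
    rw [prefOfAlt_eq]
    by_cases hs : PySem.Str.startswith (PySem.Str.upper r) "SINAPI"
    · simp only [prefOf, if_pos hs]
      exact main_pref 3 2 1 (by decide) (by decide) (by decide) (c0 :: rest)
    · by_cases hm : (PySem.Str.upper r == "CDHU" || PySem.Str.upper r == "EDIF" ||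
        PySem.Str.upper r == "FDE") = true
      · simp only [prefOf, if_neg hs, if_pos hm]
        exact main_pref 2 1 3 (by decide) (by decide) (by decide) (c0 :: rest)
      · simp only [prefOf, if_neg hs, if_neg hm]
        exact main_pref 2 3 1 (by decide) (by decide) (by decide) (c0 :: rest)
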